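-- pv_equiv track=rewrite | github.com/navipilot/openpilot | system/ui/lib/wifi_manager.py | _parse_nmcli_line
-- ===== SOURCE A (Python) =====
-- def _parse_nmcli_line(line: str) -> list[str]:
--   out: list[str] = []
--   cur = []
--   escaped = False
--   for ch in line:
--     if escaped:
--       cur.append(ch)
--       escaped = False
--     elif ch == "\\":
--       escaped = True
--     elif ch == ":":
--       out.append("".join(cur))
--       cur = []
--     else:
--       cur.append(ch)
--   out.append("".join(cur))
--   return out
-- ===== SOURCE B (Python) =====
-- import re
--
-- # Tokenize-then-unescape via one regex pass: each field is a maximal run of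
-- # escape pairs / non-special chars, optionally a dangling lone backslash
-- # (dropped, as in the original), terminated by ':' or end of string.
-- _FIELD = re.compile(r'((?:\\.|[^:\\])*)\\?(:|$)', re.DOTALL)
-- _UNESC = re.compile(r'\\(.)', re.DOTALL)
--
--
-- def _parse_nmcli_line(line: str) -> list[str]:
--   out: list[str] = []
--   for m in _FIELD.finditer(line):
--     out.append(_UNESC.sub(r'\1', m.group(1)))
--     if m.group(2) == '':  # matched end of string: last field
--       break
--   return out
-- ===== Notes on version B (the rewrite author's own statement) =====
-- stated objective: idiomatic
-- what changed: Replaces the char-by-char accumulator with an escaped-flag state by a single regex pass that tokenizes the line into maximal escaped-field matches and unescapes each token with re.sub.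
import Mathlib
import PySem

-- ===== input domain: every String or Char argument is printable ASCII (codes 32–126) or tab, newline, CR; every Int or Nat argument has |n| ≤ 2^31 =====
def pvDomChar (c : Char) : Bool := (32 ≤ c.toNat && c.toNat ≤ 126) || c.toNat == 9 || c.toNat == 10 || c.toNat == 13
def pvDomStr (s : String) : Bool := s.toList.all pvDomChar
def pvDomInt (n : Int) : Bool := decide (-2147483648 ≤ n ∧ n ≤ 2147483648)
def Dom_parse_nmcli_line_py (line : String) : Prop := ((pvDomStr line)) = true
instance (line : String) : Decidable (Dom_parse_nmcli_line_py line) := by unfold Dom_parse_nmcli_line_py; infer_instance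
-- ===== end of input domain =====

-- B replaces A's char-by-char accumulator/escape-flag loop by a regex
-- tokenize-then-unescape pass (objective: idiomatic; same return value).

-- ===== PORT A =====
-- literal transliteration of A's loop: state (out, cur, escaped)
def parse_nmcli_line_py (line : String) : List String :=
  let st := line.toList.foldl
    (fun (st : List String × List Char × Bool) ch =>
      if st.2.2 then (st.1, st.2.1 ++ [ch], false)
      else if ch = '\\' then (st.1, st.2.1, true)
      else if ch = ':' then (st.1 ++ [String.mk st.2.1], [], false)
      else (st.1, st.2.1 ++ [ch], false))
    ([], [], false)
  st.1 ++ [String.mk st.2.1]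

-- ===== PORT B =====
-- Hand port of the regex r'((?:\\.|[^:\\])*)\?(:|$)' (DOTALL), exact on all
-- inputs: one match = (group-1 token, colon-terminator flag, rest of string).
def pvFieldTok : List Char → List Char × Bool × List Char
  | [] => ([], false, [])
  | c :: rest =>
    if c = '\\' then
      match rest with
      | [] => ([], false, [])        -- dangling lone backslash before end: eaten by \?$
      | c2 :: rest2 =>
        let r := pvFieldTok rest2
        ('\\' :: c2 :: r.1, r.2.1, r.2.2)
    else if c = ':' then ([], true, rest)
    else
      let r := pvFieldTok rest
      (c :: r.1, r.2.1, r.2.2)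

-- needed by pvFields's termination proof (cited in decreasing_by)
theorem pvFieldTok_len_aux : ∀ (n : ℕ) (s : List Char), s.length ≤ n →
    (pvFieldTok s).2.2.length ≤ s.length ∧
      ((pvFieldTok s).2.1 = true → (pvFieldTok s).2.2.length < s.length) := by
  intro n
  induction n with
  | zero =>
    intro s hs
    have : s = [] := List.eq_nil_of_length_eq_zero (Nat.le_zero.mp hs)
    subst this; simp [pvFieldTok]
  | succ n ih =>
    intro s hs
    match s with
    | [] => simp [pvFieldTok]
    | c :: rest =>
      by_cases hc : c = '\\'
      · subst hc
        match rest with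
        | [] => simp [pvFieldTok]
        | c2 :: rest2 =>
          have h2 : rest2.length ≤ n := by simp at hs; omega
          obtain ⟨ha, hb⟩ := ih rest2 h2
          rw [pvFieldTok.eq_def]
          simp only []
          constructor
          · simp; omega
          · intro h; simp at h ⊢; have := hb h; omega
      · by_cases hcol : c = ':'
        · subst hcol
          rw [pvFieldTok.eq_def]; simp
        · have h1 : rest.length ≤ n := by simp at hs; omega
          obtain ⟨ha, hb⟩ := ih rest h1
          rw [pvFieldTok.eq_def]
          simp only [if_neg hc, if_neg hcol]
          constructor
          · simp; omega
          · intro h; simp at h ⊢; have := hb h; omega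

theorem pvFieldTok_lt (s : List Char) (h : (pvFieldTok s).2.1 = true) :
    (pvFieldTok s).2.2.length < s.length :=
  (pvFieldTok_len_aux s.length s (Nat.le_refl _)).2 h

-- the finditer loop with break: collect tokens until the $-terminated match
def pvFields (s : List Char) : List (List Char) :=
  let r := pvFieldTok s
  if h : r.2.1 = true then r.1 :: pvFields r.2.2 else [r.1]
termination_by s.length
decreasing_by exact pvFieldTok_lt s h

-- hand port of re.sub(r'\\(.)', r'\1', tok) (DOTALL), exact on all inputs
def pvUnesc : List Char → List Char
  | [] => []
  | c :: rest =>
    if c = '\\' then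
      match rest with
      | [] => ['\\']                 -- unmatched trailing backslash left as-is by sub
      | c2 :: rest2 => c2 :: pvUnesc rest2
    else c :: pvUnesc rest

def parse_nmcli_line_py_alt (line : String) : List String :=
  (pvFields line.toList).map (fun t => String.mk (pvUnesc t))

-- ===== PRECONDITION & SPEC =====
def Spec_parse_nmcli_line_py (line : String) (out : List String) : Prop := out = parse_nmcli_line_py_alt line
instance (line : String) (out : List String) : Decidable (Spec_parse_nmcli_line_py line out) := by unfold Spec_parse_nmcli_line_py; infer_instance

-- ===== CLAIM (what is proved, stated in full; the proofs are below) =====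
def Claim_equal_parse_nmcli_line_py : Prop := ∀ (line : String), Dom_parse_nmcli_line_py line → Spec_parse_nmcli_line_py line (parse_nmcli_line_py line)

-- ===== LEMMAS AND PROOFS =====

theorem pvTok_nil : pvFieldTok [] = ([], false, []) := by simp [pvFieldTok]
theorem pvTok_esc1 : pvFieldTok ['\\'] = ([], false, []) := by simp [pvFieldTok]
theorem pvTok_esc2 (c2 : Char) (rest2 : List Char) :
    pvFieldTok ('\\' :: c2 :: rest2)
      = ('\\' :: c2 :: (pvFieldTok rest2).1, (pvFieldTok rest2).2.1, (pvFieldTok rest2).2.2) := by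
  simp [pvFieldTok]
theorem pvTok_colon (rest : List Char) : pvFieldTok (':' :: rest) = ([], true, rest) := by
  rw [pvFieldTok.eq_def]; simp
theorem pvTok_other (c : Char) (rest : List Char) (hc : ¬ c = '\\') (hcol : ¬ c = ':') :
    pvFieldTok (c :: rest)
      = (c :: (pvFieldTok rest).1, (pvFieldTok rest).2.1, (pvFieldTok rest).2.2) := by
  rw [pvFieldTok.eq_def]; simp [hc, hcol]

theorem pvFields_eq (s : List Char) :
    pvFields s = if (pvFieldTok s).2.1 = true
      then (pvFieldTok s).1 :: pvFields (pvFieldTok s).2.2 else [(pvFieldTok s).1] := by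
  rw [pvFields]
  split <;> rename_i h <;> simp [h]

def pvStepA (st : List String × List Char × Bool) (ch : Char) : List String × List Char × Bool :=
  if st.2.2 then (st.1, st.2.1 ++ [ch], false)
  else if ch = '\\' then (st.1, st.2.1, true)
  else if ch = ':' then (st.1 ++ [String.mk st.2.1], [], false)
  else (st.1, st.2.1 ++ [ch], false)

def pvGlue (cur : List Char) : List (List Char) → List String
  | [] => [String.mk cur]
  | f :: fs => String.mk (cur ++ pvUnesc f) :: fs.map (fun t => String.mk (pvUnesc t))

theorem pvGlue_nil (s : List Char) :
    pvGlue [] (pvFields s) = (pvFields s).map (fun t => String.mk (pvUnesc t)) := by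
  rw [pvFields_eq]
  split <;> simp [pvGlue]

theorem pvMain : ∀ (n : ℕ) (s : List Char), s.length ≤ n → ∀ (out : List String) (cur : List Char),
    (List.foldl pvStepA (out, cur, false) s).1 ++
        [String.mk (List.foldl pvStepA (out, cur, false) s).2.1]
      = out ++ pvGlue cur (pvFields s) := by
  intro n
  induction n with
  | zero =>
    intro s hs out cur
    have : s = [] := List.eq_nil_of_length_eq_zero (Nat.le_zero.mp hs)
    subst this
    simp [pvFields_eq, pvTok_nil, pvGlue, pvUnesc]
  | succ n ih =>
    intro s hs out cur
    match s with
    | [] => simp [pvFields_eq, pvTok_nil, pvGlue, pvUnesc]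
    | c :: rest =>
      by_cases hc : c = '\\'
      · subst hc
        match rest with
        | [] =>
          rw [List.foldl_cons,
            show pvStepA (out, cur, false) '\\' = (out, cur, true) by simp [pvStepA]]
          simp [pvFields_eq, pvTok_esc1, pvGlue, pvUnesc]
        | c2 :: rest2 =>
          have h2 : rest2.length ≤ n := by simp at hs; omega
          rw [List.foldl_cons, List.foldl_cons,
            show pvStepA (out, cur, false) '\\' = (out, cur, true) by simp [pvStepA],
            show pvStepA ((out : List String), cur, true) c2 = (out, cur ++ [c2], false) by
              simp [pvStepA]]
          rw [ih rest2 h2 out (cur ++ [c2])]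
          congr 1
          rw [pvFields_eq ('\\' :: c2 :: rest2), pvTok_esc2, pvFields_eq rest2]
          have hU : pvUnesc ('\\' :: c2 :: (pvFieldTok rest2).1)
              = c2 :: pvUnesc (pvFieldTok rest2).1 := by simp [pvUnesc]
          by_cases hsaw : (pvFieldTok rest2).2.1 = true <;>
            simp [hsaw, pvGlue, hU, List.append_assoc]
      · by_cases hcol : c = ':'
        · subst hcol
          have h1 : rest.length ≤ n := by simp at hs; omega
          rw [List.foldl_cons,
            show pvStepA (out, cur, false) ':' = (out ++ [String.mk cur], [], false) by
              simp [pvStepA]]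
          rw [ih rest h1 (out ++ [String.mk cur]) [], pvGlue_nil]
          rw [pvFields_eq (':' :: rest), pvTok_colon]
          simp [pvGlue, pvUnesc]
        · have h1 : rest.length ≤ n := by simp at hs; omega
          rw [List.foldl_cons,
            show pvStepA (out, cur, false) c = (out, cur ++ [c], false) by
              simp [pvStepA, hc, hcol]]
          rw [ih rest h1 out (cur ++ [c])]
          congr 1
          rw [pvFields_eq (c :: rest), pvTok_other c rest hc hcol, pvFields_eq rest]
          have hU : pvUnesc (c :: (pvFieldTok rest).1)
              = c :: pvUnesc (pvFieldTok rest).1 := by rw [pvUnesc.eq_def]; simp [hc]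
          by_cases hsaw : (pvFieldTok rest).2.1 = true <;>
            simp [hsaw, pvGlue, hU, List.append_assoc]

-- ===== VERDICT (by name: the statement is the Claim_ definition above) =====
theorem parse_nmcli_line_py_spec : Claim_equal_parse_nmcli_line_py := by
  intro line _
  unfold Spec_parse_nmcli_line_py parse_nmcli_line_py parse_nmcli_line_py_alt
  have h := pvMain line.toList.length line.toList (Nat.le_refl _) [] []
  simp only [show (fun (st : List String × List Char × Bool) ch =>
      if st.2.2 then (st.1, st.2.1 ++ [ch], false)
      else if ch = '\\' then (st.1, st.2.1, true)
      else if ch = ':' then (st.1 ++ [String.mk st.2.1], [], false)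
      else (st.1, st.2.1 ++ [ch], false)) = pvStepA from rfl]
  rw [h, pvGlue_nil]
  simp
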